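-- pv_equiv track=rewrite | github.com/methmx83/fl-studio_agent | src/fl_studio_agent_mcp/server.py | _pick_port
-- ===== SOURCE A (Python) =====
-- def _pick_port(base: str, names: list[str]) -> str | None:
--     # Prefer prefix matches, then substring matches.
--     base_l = base.lower()
--     for n in names:
--         if n.lower().startswith(base_l):
--             return n
--     for n in names:
--         if base_l in n.lower():
--             return n
--     return None
-- ===== SOURCE B (Python) =====
-- def _pick_port(base: str, names: list[str]) -> str | None:
--     # Single pass: return a prefix match immediately, remember the first substring match.
--     base_l = base.lower()
--     first_substr = None
--     for n in names:
--         nl = n.lower()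
--         if nl.startswith(base_l):
--             return n
--         if base_l in nl and first_substr is None:
--             first_substr = n
--     return first_substr
-- ===== Notes on version B (the rewrite author's own statement) =====
-- stated objective: alternative
-- what changed: Replaces A's two sequential scans with a single pass that returns a prefix match immediately and carries the first substring match as a pending candidate.
import Mathlib
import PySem

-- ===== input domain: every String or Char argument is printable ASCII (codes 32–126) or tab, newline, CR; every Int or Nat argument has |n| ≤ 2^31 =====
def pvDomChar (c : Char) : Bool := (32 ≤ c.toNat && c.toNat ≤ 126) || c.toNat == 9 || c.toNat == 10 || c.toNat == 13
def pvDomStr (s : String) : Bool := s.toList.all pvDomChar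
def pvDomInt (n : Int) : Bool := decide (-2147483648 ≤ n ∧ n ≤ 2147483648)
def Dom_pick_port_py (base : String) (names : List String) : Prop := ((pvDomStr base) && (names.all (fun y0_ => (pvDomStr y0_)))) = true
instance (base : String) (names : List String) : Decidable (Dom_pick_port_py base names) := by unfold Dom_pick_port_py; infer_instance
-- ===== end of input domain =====

-- B folds A's two sequential scans into one pass carrying a pending substring candidate (objective: alternative decomposition).

-- ===== PORT A =====
-- two scans: first return the first prefix match, then the first substring match
def pick_port_py (base : String) (names : List String) : Option String :=
  let base_l := PySem.Str.lower base
  match names.find? (fun n => PySem.Str.startswith (PySem.Str.lower n) base_l) with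
  | some n => some n
  | none => names.find? (fun n => PySem.Str.isIn base_l (PySem.Str.lower n))

-- ===== PORT B =====
-- one pass: return a prefix match immediately, remember the first substring match
def pickLoop (base_l : String) : List String → Option String → Option String
  | [], pending => pending
  | n :: rest, pending =>
    let nl := PySem.Str.lower n
    if PySem.Str.startswith nl base_l then some n
    else if PySem.Str.isIn base_l nl && pending.isNone then pickLoop base_l rest (some n)
    else pickLoop base_l rest pending

def pick_port_py_alt (base : String) (names : List String) : Option String :=
  pickLoop (PySem.Str.lower base) names none

-- ===== PRECONDITION & SPEC =====
def Spec_pick_port_py (base : String) (names : List String) (out : Option String) : Prop := out = pick_port_py_alt base names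
instance (base : String) (names : List String) (out : Option String) : Decidable (Spec_pick_port_py base names out) := by unfold Spec_pick_port_py; infer_instance

-- ===== CLAIM (what is proved, stated in full; the proofs are below) =====
def Claim_equal_pick_port_py : Prop := ∀ (base : String) (names : List String), Dom_pick_port_py base names → Spec_pick_port_py base names (pick_port_py base names)

-- ===== LEMMAS AND PROOFS =====
theorem pickLoop_eq (bl : String) (names : List String) (pending : Option String) :
    pickLoop bl names pending =
      match names.find? (fun n => PySem.Str.startswith (PySem.Str.lower n) bl) with
      | some n => some n
      | none =>
        match pending with
        | some p => some p
        | none => names.find? (fun n => PySem.Str.isIn bl (PySem.Str.lower n)) := by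
  induction names generalizing pending with
  | nil => cases pending <;> simp [pickLoop]
  | cons n rest ih =>
    simp only [pickLoop, List.find?]
    by_cases hpre : PySem.Chars.startswith (PySem.Chars.lower n.toList) bl.toList = true
    · simp [hpre]
    · by_cases hsub : PySem.Chars.isIn bl.toList (PySem.Chars.lower n.toList) = true
      · cases pending with
        | some p => simp [hpre, hsub, ih]
        | none => simp [hpre, hsub, ih]
      · cases pending with
        | some p => simp [hpre, hsub, ih]
        | none => simp [hpre, hsub, ih]

-- ===== VERDICT (by name: the statement is the Claim_ definition above) =====
theorem pick_port_py_spec : Claim_equal_pick_port_py := by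
  intro base names _
  unfold Spec_pick_port_py pick_port_py pick_port_py_alt
  rw [pickLoop_eq]
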